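-- pv_equiv track=rewrite | github.com/kerfriden/SurrOptim | src/sparse_grid.py | compute_n_from_level
-- ===== SOURCE A (Python) =====
-- def compute_n_from_level(l: int) -> int:
--     """
--     Map refinement level to number of quadrature nodes.
--
--     Args:
--         l: Refinement level (0, 1, 2, ...)
--
--     Returns:
--         Number of nodes
--
--     Raises:
--         ValueError: If level is invalid
--     """
--     if l < 0:
--         raise ValueError(f"Refinement level must be non-negative, got {l}")
--
--     if l == 0:
--         return 0
--     elif l == 1:
--         return 1
--     elif l == 2:
--         return 3
--     else:
--         n = 3
--         for _ in range(l - 2):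
--             n = n + (n - 1)
--         return n
-- ===== SOURCE B (Python) =====
-- def compute_n_from_level(l: int) -> int:
--     """Branch-lean closed form: below level 2 the node count equals the level
--     itself; from level 2 on it is 2^(l-1)+1, computed with a bit shift."""
--     if l < 0:
--         raise ValueError(f"Refinement level must be non-negative, got {l}")
--     return l if l < 2 else (1 << (l - 1)) + 1
-- ===== Notes on version B (the rewrite author's own statement) =====
-- stated objective: faster
-- what changed: Replaces the O(l) accumulation loop and the three-way if/elif chain with a single closed-form bit shift; intended as faster — a timing run measured about 1900x at the mid sizes, while at the largest size A timed out and B's huge result exceeded Python's int-to-str decode limit.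
import Mathlib
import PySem

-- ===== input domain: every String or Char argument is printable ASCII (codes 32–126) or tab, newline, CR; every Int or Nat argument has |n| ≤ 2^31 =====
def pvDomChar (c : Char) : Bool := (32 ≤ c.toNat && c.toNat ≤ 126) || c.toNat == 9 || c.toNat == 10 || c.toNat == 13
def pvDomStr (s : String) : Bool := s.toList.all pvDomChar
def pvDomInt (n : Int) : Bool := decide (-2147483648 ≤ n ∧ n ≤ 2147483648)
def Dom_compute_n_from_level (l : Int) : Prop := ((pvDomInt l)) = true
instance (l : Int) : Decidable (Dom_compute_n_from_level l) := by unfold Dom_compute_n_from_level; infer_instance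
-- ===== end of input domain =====

-- B replaces the accumulation loop and if/elif chain by a closed-form bit shift; intended as faster (measured ~1900x at the mid sizes; at the largest size A timed out and B's result exceeded the decode limit).

-- ===== PORT A =====
def compute_n_from_level (l : Int) : Int :=
  -- a negative level raises ValueError in Python: excluded by Pre_
  if l = 0 then 0
  else if l = 1 then 1
  else if l = 2 then 3
  else (List.range (l - 2).toNat).foldl (fun n _ => n + (n - 1)) 3

-- ===== PORT B =====
def compute_n_from_level_alt (l : Int) : Int :=
  -- a negative level raises ValueError in Python: excluded by Pre_
  if l < 2 then l else ((1 : Int) <<< (l - 1).toNat) + 1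

-- ===== PRECONDITION & SPEC =====
-- Pre_ excludes negative levels, where the Python A raises ValueError (B raises too).
def Pre_compute_n_from_level (l : Int) : Prop := 0 ≤ l
instance (l : Int) : Decidable (Pre_compute_n_from_level l) := by unfold Pre_compute_n_from_level; infer_instance
def pvWitness_compute_n_from_level : Int := 3

def Spec_compute_n_from_level (l : Int) (out : Int) : Prop := out = compute_n_from_level_alt l
instance (l : Int) (out : Int) : Decidable (Spec_compute_n_from_level l out) := by unfold Spec_compute_n_from_level; infer_instance

-- ===== CLAIM (what is proved, stated in full; the proofs are below) =====
def Claim_equal_compute_n_from_level : Prop := ∀ (l : Int), Dom_compute_n_from_level l → Pre_compute_n_from_level l → Spec_compute_n_from_level l (compute_n_from_level l)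

-- ===== LEMMAS AND PROOFS =====
-- A's accumulation loop starting at 3 computes 2^(k+1) + 1 after k steps.
theorem loop_closed (k : Nat) :
    (List.range k).foldl (fun n _ => n + (n - 1)) (3 : Int) = 2 ^ (k + 1) + 1 := by
  induction k with
  | zero => simp
  | succ k ih =>
    rw [List.range_succ, List.foldl_append, ih]
    simp [pow_succ]
    ring

-- ===== VERDICT (by name: the statement is the Claim_ definition above) =====
theorem compute_n_from_level_spec : Claim_equal_compute_n_from_level := by
  intro l _ hl
  unfold Pre_compute_n_from_level at hl
  unfold Spec_compute_n_from_level compute_n_from_level compute_n_from_level_alt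
  rw [Int.shiftLeft_eq, one_mul]
  by_cases h0 : l = 0
  · simp [h0]
  by_cases h1 : l = 1
  · simp [h1]
  have h2 : ¬ l < 2 := by omega
  rw [if_neg h2, if_neg h0, if_neg h1]
  by_cases h3 : l = 2
  · subst h3; norm_num
  · rw [if_neg h3, loop_closed]
    have he : (l - 2).toNat + 1 = (l - 1).toNat := by omega
    rw [he]
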